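-- pv_equiv track=rewrite | github.com/przemyslawjanpietrzak/traveling-salesman-problem | branch_bound/data.py | get_road
-- ===== SOURCE A (Python) =====
-- Home = 0
--
-- def get_road(input, distances):
--     current_location = Home
--     total_distance = 0
--     for item in input:
--         total_distance += distances[current_location][item]
--         current_location = item
--     total_distance += distances[current_location][Home]  # back to home
--     return total_distance
-- ===== SOURCE B (Python) =====
-- Home = 0
--
-- def get_road(input, distances):
--     # Recursive decomposition: cost of the remaining tour from a given node,
--     # instead of A's iterative accumulator loop.
--     def cost(cur, rest):
--         if not rest:
--             return distances[cur][Home]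
--         nxt = rest[0]
--         return distances[cur][nxt] + cost(nxt, rest[1:])
--     return cost(Home, list(input))
-- ===== Notes on version B (the rewrite author's own statement) =====
-- stated objective: alternative
-- what changed: B replaces A's iterative loop threading a current_location/total accumulator by a structural recursion computing the cost of the remaining tour from the current node (right-associated sum, no accumulator state).
import Mathlib
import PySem

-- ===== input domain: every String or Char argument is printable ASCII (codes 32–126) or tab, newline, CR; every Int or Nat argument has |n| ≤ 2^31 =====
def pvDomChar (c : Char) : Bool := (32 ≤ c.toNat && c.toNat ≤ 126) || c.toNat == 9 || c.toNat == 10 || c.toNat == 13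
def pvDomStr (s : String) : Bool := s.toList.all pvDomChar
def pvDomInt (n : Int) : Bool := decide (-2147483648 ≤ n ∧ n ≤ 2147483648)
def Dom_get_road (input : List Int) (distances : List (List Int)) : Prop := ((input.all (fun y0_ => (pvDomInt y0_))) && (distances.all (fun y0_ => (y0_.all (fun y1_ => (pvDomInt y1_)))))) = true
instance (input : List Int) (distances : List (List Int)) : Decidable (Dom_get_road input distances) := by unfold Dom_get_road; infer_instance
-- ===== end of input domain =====

-- B replaces A's accumulator loop by a structural recursion on the remaining tour (objective: alternative decomposition, same cost).


-- shared helper: distances[a][b] (Python indexing, incl. negative wraparound); Pre_ guarantees both lookups succeed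
def pvDist (distances : List (List Int)) (a b : Int) : Int :=
  PySem.List.pyGetD (PySem.List.pyGetD distances a []) b 0

-- ===== PORT A =====
def get_road (input : List Int) (distances : List (List Int)) : Int :=
  let s := input.foldl
    (fun (s : Int × Int) item => (item, s.2 + pvDist distances s.1 item)) (0, 0)
  s.2 + pvDist distances s.1 0

-- ===== PORT B =====
def get_road_alt_cost (distances : List (List Int)) (cur : Int) : List Int → Int
  | [] => pvDist distances cur 0
  | nxt :: rest => pvDist distances cur nxt + get_road_alt_cost distances nxt rest

def get_road_alt (input : List Int) (distances : List (List Int)) : Int :=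
  get_road_alt_cost distances 0 input

-- ===== PRECONDITION & SPEC =====
-- Pre_ excludes exactly the inputs on which Python A raises IndexError: every consecutive
-- pair (a,b) of the tour path 0 :: input ++ [0] must index an existing row and an existing entry.
def Pre_get_road (input : List Int) (distances : List (List Int)) : Prop :=
  ∀ p ∈ (((0 :: input) ++ [0]).zip ((0 :: input) ++ [0]).tail),
    ((PySem.List.pyGet? distances p.1).bind (fun row => PySem.List.pyGet? row p.2)).isSome = true
instance (input : List Int) (distances : List (List Int)) : Decidable (Pre_get_road input distances) := by unfold Pre_get_road; infer_instance

def pvWitness_get_road : List Int × List (List Int) := ([1], [[0, 7], [3, 0]])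

def Spec_get_road (input : List Int) (distances : List (List Int)) (out : Int) : Prop := out = get_road_alt input distances
instance (input : List Int) (distances : List (List Int)) (out : Int) : Decidable (Spec_get_road input distances out) := by unfold Spec_get_road; infer_instance

-- ===== CLAIM (what is proved, stated in full; the proofs are below) =====
def Claim_equal_get_road : Prop := ∀ (input : List Int) (distances : List (List Int)), Dom_get_road input distances → Pre_get_road input distances → Spec_get_road input distances (get_road input distances)

-- ===== LEMMAS AND PROOFS =====

theorem pv_key (d : List (List Int)) (l : List Int) (cur acc : Int) :
    (let s := l.foldl (fun (s : Int × Int) item => (item, s.2 + pvDist d s.1 item)) (cur, acc)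
     s.2 + pvDist d s.1 0) = acc + get_road_alt_cost d cur l := by
  induction l generalizing cur acc with
  | nil => simp [get_road_alt_cost]
  | cons x xs ih =>
    simp only [List.foldl, get_road_alt_cost]
    rw [ih x (acc + pvDist d cur x)]
    ring

-- ===== VERDICT (by name: the statement is the Claim_ definition above) =====
theorem get_road_spec : Claim_equal_get_road := by
  intro input distances _ _
  unfold Spec_get_road get_road get_road_alt
  simpa using pv_key distances input 0 0
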